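-- pv_equiv track=rewrite | github.com/yanjz124/vatsim-watchlist-bot | extensions/faa_adv_monitor.py | _parse_faa_text
-- ===== SOURCE A (Python) =====
-- def _parse_faa_text(text):
--     # Known section headers
--     headers = [
--         "EVENT TIME:",
--         "STAFFING TRIGGER(S):",
--         "TERMINAL CONSTRAINTS:",
--         "TERMINAL ACTIVE:",
--         "TERMINAL PLANNED:",
--         "EN ROUTE CONSTRAINTS:",
--         "EN ROUTE ACTIVE:",
--         "EN ROUTE PLANNED:",
--         "CDRS/SWAP/CAPPING/TUNNELING/HOTLINE/DIVERSION RECOVERY:",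
--         "RUNWAY/EQUIPMENT/POSSIBLE SYSTEM IMPACT REPORTS (SIRs):",
--         "AIRSPACE FLOW PROGRAM(S) ACTIVE:",
--         "AIRSPACE FLOW PROGRAM(S) PLANNED:",
--         "PLANNED LAUNCH/REENTRY:",
--         "FLIGHT CHECK(S):",
--         "VIP MOVEMENT(S):",
--         "NEXT PLANNING WEBINAR:"
--     ]
--
--     sections = []
--     lines = text.splitlines()
--     current_header = None
--     current_content = []
--
--     for line in lines:
--         line = line.strip()
--         if not line:
--             continue
--         # Check if line is a header
--         if any(line.startswith(h) for h in headers):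
--             # Save previous section
--             if current_header:
--                 content = "\n".join(current_content).strip()
--                 if content:
--                     sections.append((current_header, content))
--             # Start new section
--             current_header = line
--             current_content = []
--         else:
--             if current_header:
--                 current_content.append(line)
--
--     # Last section
--     if current_header:
--         content = "\n".join(current_content).strip()
--         if content:
--             sections.append((current_header, content))
--
--     return sections
-- ===== SOURCE B (Python) =====
-- _HEADERS = [
--     "EVENT TIME:",
--     "STAFFING TRIGGER(S):",
--     "TERMINAL CONSTRAINTS:",
--     "TERMINAL ACTIVE:",
--     "TERMINAL PLANNED:",
--     "EN ROUTE CONSTRAINTS:",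
--     "EN ROUTE ACTIVE:",
--     "EN ROUTE PLANNED:",
--     "CDRS/SWAP/CAPPING/TUNNELING/HOTLINE/DIVERSION RECOVERY:",
--     "RUNWAY/EQUIPMENT/POSSIBLE SYSTEM IMPACT REPORTS (SIRs):",
--     "AIRSPACE FLOW PROGRAM(S) ACTIVE:",
--     "AIRSPACE FLOW PROGRAM(S) PLANNED:",
--     "PLANNED LAUNCH/REENTRY:",
--     "FLIGHT CHECK(S):",
--     "VIP MOVEMENT(S):",
--     "NEXT PLANNING WEBINAR:",
-- ]
--
--
-- def _is_header(line):
--     return any(line.startswith(h) for h in _HEADERS)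
--
--
-- def _parse_faa_text(text):
--     # Clean first: strip every line, drop empties.
--     cleaned = [s for s in (l.strip() for l in text.splitlines()) if s]
--     # Drop everything before the first header line.
--     rest = cleaned
--     while rest and not _is_header(rest[0]):
--         rest = rest[1:]
--     # Each remaining chunk starts with a header; slice up to the next header.
--     sections = []
--     while rest:
--         header, rest = rest[0], rest[1:]
--         body = []
--         while rest and not _is_header(rest[0]):
--             body.append(rest[0])
--             rest = rest[1:]
--         content = "\n".join(body).strip()
--         if content:
--             sections.append((header, content))
--     return sections
-- ===== Notes on version B (the rewrite author's own statement) =====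
-- stated objective: alternative
-- what changed: B first builds the cleaned line list (strip, drop empties) and drops the pre-header prefix, then cuts the list into header-delimited chunks and emits each chunk's section, instead of A's single pass with a running (current_header, current_content) accumulator and end-of-loop flush.
import Mathlib
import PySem

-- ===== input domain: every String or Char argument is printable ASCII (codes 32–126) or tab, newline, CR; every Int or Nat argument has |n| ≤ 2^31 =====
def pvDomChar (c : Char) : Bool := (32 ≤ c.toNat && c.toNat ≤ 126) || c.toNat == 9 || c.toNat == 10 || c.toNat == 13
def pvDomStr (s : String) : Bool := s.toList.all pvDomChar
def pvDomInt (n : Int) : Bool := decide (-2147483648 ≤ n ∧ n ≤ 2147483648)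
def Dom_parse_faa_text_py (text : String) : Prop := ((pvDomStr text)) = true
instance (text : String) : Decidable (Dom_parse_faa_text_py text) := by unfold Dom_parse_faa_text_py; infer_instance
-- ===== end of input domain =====

-- B cleans all lines first, drops the pre-header prefix, then cuts header-delimited
-- chunks, instead of A's single running (header, content) accumulator; objective: alternative decomposition.

-- ===== PORT A =====
def pvHeaders : List String := [
  "EVENT TIME:",
  "STAFFING TRIGGER(S):",
  "TERMINAL CONSTRAINTS:",
  "TERMINAL ACTIVE:",
  "TERMINAL PLANNED:",
  "EN ROUTE CONSTRAINTS:",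
  "EN ROUTE ACTIVE:",
  "EN ROUTE PLANNED:",
  "CDRS/SWAP/CAPPING/TUNNELING/HOTLINE/DIVERSION RECOVERY:",
  "RUNWAY/EQUIPMENT/POSSIBLE SYSTEM IMPACT REPORTS (SIRs):",
  "AIRSPACE FLOW PROGRAM(S) ACTIVE:",
  "AIRSPACE FLOW PROGRAM(S) PLANNED:",
  "PLANNED LAUNCH/REENTRY:",
  "FLIGHT CHECK(S):",
  "VIP MOVEMENT(S):",
  "NEXT PLANNING WEBINAR:"]

-- any(line.startswith(h) for h in headers)
def pvIsHeader (line : String) : Bool := pvHeaders.any (fun h => PySem.Str.startswith line h)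

-- the 'save previous section' / final-flush code of A (identical in both places in the Python)
def pvFinish (st : List (String × String) × Option String × List String) : List (String × String) :=
  match st.2.1 with
  | some h =>
    let content := PySem.Str.strip (PySem.Str.join "\n" st.2.2)
    if content = "" then st.1 else st.1 ++ [(h, content)]
  | none => st.1

-- A's loop body
def pvStepA (st : List (String × String) × Option String × List String) (line : String) :
    List (String × String) × Option String × List String :=
  let line := PySem.Str.strip line
  if line = "" then st
  else if pvIsHeader line then (pvFinish st, some line, [])
  else
    match st.2.1 with
    | some _ => (st.1, st.2.1, st.2.2 ++ [line])
    | none => st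

def parse_faa_text_py (text : String) : List (String × String) :=
  let lines := PySem.Str.splitlines text
  pvFinish (lines.foldl pvStepA ([], none, []))

-- ===== PORT B =====
-- inner while: collect body lines up to the next header, return (body, remaining)
def pvSpan : List String → List String → List String × List String
  | body, [] => (body, [])
  | body, s :: rest => if pvIsHeader s then (body, s :: rest) else pvSpan (body ++ [s]) rest

theorem pvSpan_snd_le (body rest : List String) : (pvSpan body rest).2.length ≤ rest.length := by
  induction rest generalizing body with
  | nil => simp [pvSpan]
  | cons s r ih =>
    simp only [pvSpan]
    split
    · simp
    · exact Nat.le_succ_of_le (ih _)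

-- first while: drop lines before the first header
def pvSkip : List String → List String
  | [] => []
  | s :: rest => if pvIsHeader s then s :: rest else pvSkip rest

-- second while: one section per header chunk
def pvGo : List String → List (String × String)
  | [] => []
  | h :: rest =>
    let p := pvSpan [] rest
    let content := PySem.Str.strip (PySem.Str.join "\n" p.1)
    (if content = "" then [] else [(h, content)]) ++ pvGo p.2
  termination_by l => l.length
  decreasing_by exact Nat.lt_succ_of_le (pvSpan_snd_le [] rest)

def parse_faa_text_py_alt (text : String) : List (String × String) :=
  let cleaned := ((PySem.Str.splitlines text).map PySem.Str.strip).filter (fun s => s ≠ "")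
  pvGo (pvSkip cleaned)

-- ===== PRECONDITION & SPEC =====
def Spec_parse_faa_text_py (text : String) (out : List (String × String)) : Prop := out = parse_faa_text_py_alt text
instance (text : String) (out : List (String × String)) : Decidable (Spec_parse_faa_text_py text out) := by unfold Spec_parse_faa_text_py; infer_instance

-- ===== CLAIM (what is proved, stated in full; the proofs are below) =====
def Claim_equal_parse_faa_text_py : Prop := ∀ (text : String), Dom_parse_faa_text_py text → Spec_parse_faa_text_py text (parse_faa_text_py text)

-- ===== LEMMAS AND PROOFS =====

-- A's loop body restricted to already-cleaned (stripped, non-empty) lines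
def pvStepG (st : List (String × String) × Option String × List String) (l : String) :
    List (String × String) × Option String × List String :=
  if pvIsHeader l then (pvFinish st, some l, [])
  else
    match st.2.1 with
    | some _ => (st.1, st.2.1, st.2.2 ++ [l])
    | none => st

theorem pvGo_cons (h : String) (rest : List String) :
    pvGo (h :: rest)
      = (let content := PySem.Str.strip (PySem.Str.join "\n" (pvSpan [] rest).1);
          if content = "" then [] else [(h, content)]) ++ pvGo (pvSpan [] rest).2 := by
  rw [pvGo]

-- fusion: A's strip-and-skip-empties loop is the cleaned-line loop over B's cleaned list
theorem pv_fold_fusion (lines : List String)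
    (st : List (String × String) × Option String × List String) :
    lines.foldl pvStepA st
      = ((lines.map PySem.Str.strip).filter (fun s => s ≠ "")).foldl pvStepG st := by
  induction lines generalizing st with
  | nil => rfl
  | cons l rest ih =>
    simp only [List.foldl_cons, List.map_cons, List.filter_cons]
    by_cases h : PySem.Str.strip l = ""
    · rw [if_neg (by simp [h])]
      have hs : pvStepA st l = st := by simp [pvStepA, h]
      rw [hs, ih]
    · rw [if_pos (by simp [h]), List.foldl_cons]
      have hs : pvStepA st l = pvStepG st (PySem.Str.strip l) := by
        simp [pvStepA, pvStepG, h]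
      rw [hs, ih]

-- main invariant: from a state with an open header, the rest of A's loop (plus the
-- final flush) produces B's chunked sections
theorem pv_main (rest : List String) (secs : List (String × String)) (h : String)
    (c : List String) :
    pvFinish (rest.foldl pvStepG (secs, some h, c))
      = secs ++ ((let content := PySem.Str.strip (PySem.Str.join "\n" (pvSpan c rest).1);
            if content = "" then [] else [(h, content)]) ++ pvGo (pvSpan c rest).2) := by
  induction rest generalizing secs h c with
  | nil =>
    simp only [List.foldl_nil, pvSpan, pvFinish, pvGo]
    split_ifs <;> simp
  | cons l r ih =>
    by_cases hl : pvIsHeader l = true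
    · rw [List.foldl_cons,
        show pvStepG (secs, some h, c) l = (pvFinish (secs, some h, c), some l, []) from by
          simp [pvStepG, hl],
        ih,
        show pvSpan c (l :: r) = (c, l :: r) from by simp [pvSpan, hl]]
      rw [pvGo_cons]
      simp only [pvFinish]
      split_ifs <;> simp
    · rw [List.foldl_cons,
        show pvStepG (secs, some h, c) l = (secs, some h, c ++ [l]) from by
          simp [pvStepG, hl],
        ih,
        show pvSpan c (l :: r) = pvSpan (c ++ [l]) r from by simp [pvSpan, hl]]

-- pre-header phase: the loop from the initial state is B's skip-then-chunk
theorem pv_skip (cleaned : List String) :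
    pvFinish (cleaned.foldl pvStepG ([], none, []))
      = pvGo (pvSkip cleaned) := by
  induction cleaned with
  | nil => simp [pvFinish, pvSkip, pvGo]
  | cons l r ih =>
    by_cases hl : pvIsHeader l = true
    · rw [List.foldl_cons,
        show pvStepG ([], none, []) l = ([], some l, []) from by simp [pvStepG, pvFinish, hl],
        pv_main,
        show pvSkip (l :: r) = l :: r from by simp [pvSkip, hl],
        pvGo_cons]
      simp
    · rw [List.foldl_cons,
        show pvStepG ([], none, []) l = ([], none, []) from by simp [pvStepG, hl],
        ih,
        show pvSkip (l :: r) = pvSkip r from by simp [pvSkip, hl]]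

-- ===== VERDICT (by name: the statement is the Claim_ definition above) =====
theorem parse_faa_text_py_spec : Claim_equal_parse_faa_text_py := by
  intro text _
  show parse_faa_text_py text = parse_faa_text_py_alt text
  simp only [parse_faa_text_py, parse_faa_text_py_alt, pv_fold_fusion, pv_skip]
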